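-- pv_equiv track=rewrite | github.com/NasSilverBullet/atcoder-aribon | 2-1-1/recursive/arc029_1.py | f
-- ===== SOURCE A (Python) =====
-- def f(arr):
--     a, b = 0, 0
--
--     for t in arr:
--         if a > b:
--             b += t
--         else:
--             a += t
--
--     return max(a, b)
-- ===== SOURCE B (Python) =====
-- def f(arr):
--     total = 0
--     diff = 0
--     for t in arr:
--         total += t
--         diff = abs(t - diff)
--     return (total + diff) // 2
-- ===== Notes on version B (the rewrite author's own statement) =====
-- stated objective: alternative
-- what changed: Replaces the branching two-pile greedy simulation with a branch-free loop maintaining the running sum and the absolute pile difference, returning (sum+diff)//2 via max(a,b)=(a+b+|a-b|)/2.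
import Mathlib
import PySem

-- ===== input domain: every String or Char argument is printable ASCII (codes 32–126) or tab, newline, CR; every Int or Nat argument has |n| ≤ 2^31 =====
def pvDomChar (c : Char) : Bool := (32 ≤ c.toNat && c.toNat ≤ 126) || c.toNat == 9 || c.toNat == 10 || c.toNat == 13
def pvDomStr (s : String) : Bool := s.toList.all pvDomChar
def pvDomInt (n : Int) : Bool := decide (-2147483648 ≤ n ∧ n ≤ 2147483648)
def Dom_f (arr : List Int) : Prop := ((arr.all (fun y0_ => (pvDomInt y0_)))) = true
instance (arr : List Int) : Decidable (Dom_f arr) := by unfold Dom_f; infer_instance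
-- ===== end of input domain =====

-- B replaces A's branching two-pile greedy with a branch-free loop over (sum, |difference|),
-- returning (sum + diff) // 2 = max of the two piles; same cost, no branch (objective: alternative).

-- ===== PORT A =====
def f (arr : List Int) : Int :=
  let ab := arr.foldl (fun (ab : Int × Int) t =>
    if ab.1 > ab.2 then (ab.1, ab.2 + t) else (ab.1 + t, ab.2)) (0, 0)
  max ab.1 ab.2

-- ===== PORT B =====
def f_alt (arr : List Int) : Int :=
  let sd := arr.foldl (fun (sd : Int × Int) t => (sd.1 + t, |t - sd.2|)) (0, 0)
  PySem.Int.floordiv (sd.1 + sd.2) 2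

-- ===== PRECONDITION & SPEC =====
def Spec_f (arr : List Int) (out : Int) : Prop := out = f_alt arr
instance (arr : List Int) (out : Int) : Decidable (Spec_f arr out) := by unfold Spec_f; infer_instance

-- ===== CLAIM (what is proved, stated in full; the proofs are below) =====
def Claim_equal_f : Prop := ∀ (arr : List Int), Dom_f arr → Spec_f arr (f arr)

-- ===== LEMMAS AND PROOFS =====

/-- Invariant: B's fold from (a+b, |a-b|) tracks A's fold from (a,b). -/
lemma fold_inv (arr : List Int) : ∀ (a b : Int),
    arr.foldl (fun (sd : Int × Int) t => (sd.1 + t, |t - sd.2|)) (a + b, |a - b|)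
      = (fun (ab : Int × Int) => (ab.1 + ab.2, |ab.1 - ab.2|))
        (arr.foldl (fun (ab : Int × Int) t =>
          if ab.1 > ab.2 then (ab.1, ab.2 + t) else (ab.1 + t, ab.2)) (a, b)) := by
  induction arr with
  | nil => intro a b; simp
  | cons t rest ih =>
    intro a b
    simp only [List.foldl_cons]
    by_cases h : a > b
    · have h1 : |a - b| = a - b := abs_of_pos (by omega)
      have h2 : |t - (a - b)| = |a - (b + t)| := by
        rcases abs_cases (t - (a - b)) with ⟨e, _⟩ | ⟨e, _⟩ <;>
          rcases abs_cases (a - (b + t)) with ⟨e2, _⟩ | ⟨e2, _⟩ <;> omega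
      have := ih a (b + t)
      simp only [if_pos h, h1, h2]
      rw [show a + b + t = a + (b + t) by ring]
      exact this
    · have h1 : |a - b| = b - a := by rcases abs_cases (a - b) with ⟨e, _⟩ | ⟨e, _⟩ <;> omega
      have h2 : |t - (b - a)| = |a + t - b| := by
        rcases abs_cases (t - (b - a)) with ⟨e, _⟩ | ⟨e, _⟩ <;>
          rcases abs_cases (a + t - b) with ⟨e2, _⟩ | ⟨e2, _⟩ <;> omega
      have := ih (a + t) b
      simp only [if_neg h, h1, h2]
      rw [show a + b + t = a + t + b by ring]
      exact this

lemma max_eq_half (a b : Int) : max a b = PySem.Int.floordiv (a + b + |a - b|) 2 := by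
  rcases abs_cases (a - b) with ⟨e, he⟩ | ⟨e, he⟩
  · rw [e, show a + b + (a - b) = (max a b) * 2 by rw [max_eq_left (by omega)]; ring]
    rw [(PySem.Int.floordiv_eq_iff_of_pos (by norm_num)).2 ⟨le_refl _, by omega⟩]
  · rw [e, show a + b + -(a - b) = (max a b) * 2 by rw [max_eq_right (by omega)]; ring]
    rw [(PySem.Int.floordiv_eq_iff_of_pos (by norm_num)).2 ⟨le_refl _, by omega⟩]

-- ===== VERDICT (by name: the statement is the Claim_ definition above) =====
theorem f_spec : Claim_equal_f := by
  intro arr _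
  unfold Spec_f f f_alt
  have h := fold_inv arr 0 0
  simp only [show (0 : Int) + 0 = 0 by ring, show |(0 : Int) - 0| = 0 by simp] at h
  rw [h]
  exact max_eq_half _ _
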